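-- pv_equiv track=rewrite | github.com/ATPs/XCProject | course/findHiddenInformationInDNA201612.py | skewCount
-- ===== SOURCE A (Python) =====
-- def skewCount(seq):
--     '''
--     given a seq, return a list of skew
--     skew: occurrrences of G minus occurences of C
--     CGA
--     return [0,-1,0,0]
--     '''
--     ls = [0,]
--     c = 0
--     g = 0
--     for ele in seq:
--         if ele == 'C':
--             c += 1
--         if ele == 'G':
--             g += 1
--         ls.append(g - c)
--     return ls
-- ===== SOURCE B (Python) =====
-- def skewCount(seq):
--     # Backward pass: skew of each suffix of seq (suffix sums of G/C deltas),
--     # then complement each against the total to get the prefix skews.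
--     suff = [0]
--     t = 0
--     for ele in reversed(seq):
--         if ele == 'G':
--             t += 1
--         elif ele == 'C':
--             t -= 1
--         suff.append(t)
--     return [t - x for x in reversed(suff)]
-- ===== Notes on version B (the rewrite author's own statement) =====
-- stated objective: alternative
-- what changed: Instead of a forward pass with two counters emitting g-c at each step, B traverses the string backwards accumulating suffix skews, then produces each prefix skew as total minus the corresponding suffix skew in a second complement pass.
import Mathlib
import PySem

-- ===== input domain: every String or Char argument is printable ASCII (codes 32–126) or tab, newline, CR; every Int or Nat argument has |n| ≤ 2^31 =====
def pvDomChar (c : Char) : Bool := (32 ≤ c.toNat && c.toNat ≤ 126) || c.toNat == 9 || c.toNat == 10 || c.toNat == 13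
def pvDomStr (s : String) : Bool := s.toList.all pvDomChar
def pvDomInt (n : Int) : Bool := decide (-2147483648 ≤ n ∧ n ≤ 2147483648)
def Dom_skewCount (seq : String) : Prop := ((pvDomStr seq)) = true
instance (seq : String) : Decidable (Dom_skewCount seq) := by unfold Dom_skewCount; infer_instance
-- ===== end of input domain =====

-- B differs only in structure (backward suffix-skew pass + complement pass); same values everywhere.
-- ===== PORT A =====
-- A: forward pass, two counters c/g, appending g - c after each character.
def skewAux : List Char → List Int → Int → Int → List Int
  | [], ls, _, _ => ls
  | ele :: rest, ls, c, g =>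
      let c' := if ele = 'C' then c + 1 else c
      let g' := if ele = 'G' then g + 1 else g
      skewAux rest (ls ++ [g' - c']) c' g'

def skewCount (seq : String) : List Int := skewAux seq.toList [0] 0 0

-- ===== PORT B =====
-- B: backward pass collecting suffix skews into suff with running total t,
-- then the result is [t - x for x in reversed(suff)].
def skewSuffAux : List Char → Int → List Int → Int × List Int
  | [], t, suff => (t, suff)
  | ele :: rest, t, suff =>
      let t' := if ele = 'G' then t + 1 else if ele = 'C' then t - 1 else t
      skewSuffAux rest t' (suff ++ [t'])

def skewCount_alt (seq : String) : List Int :=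
  let r := skewSuffAux seq.toList.reverse 0 [0]
  r.2.reverse.map (fun x => r.1 - x)

-- ===== PRECONDITION & SPEC =====
def Spec_skewCount (seq : String) (out : List Int) : Prop := out = skewCount_alt seq
instance (seq : String) (out : List Int) : Decidable (Spec_skewCount seq out) := by unfold Spec_skewCount; infer_instance

-- ===== CLAIM =====
def Claim_equal_skewCount : Prop := ∀ (seq : String), Dom_skewCount seq → Spec_skewCount seq (skewCount seq)

-- ===== LEMMAS AND PROOFS =====
-- proof-only helpers: per-character delta and forward cumulative sums
def skewDelta (ele : Char) : Int := if ele = 'G' then 1 else if ele = 'C' then -1 else 0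

def skewAccum : Int → List Int → List Int
  | _, [] => []
  | t, d :: ds => (t + d) :: skewAccum (t + d) ds

lemma skewAux_eq (l : List Char) : ∀ (ls : List Int) (c g : Int),
    skewAux l ls c g = ls ++ skewAccum (g - c) (l.map skewDelta) := by
  induction l with
  | nil => intro ls c g; simp [skewAux, skewAccum]
  | cons ele rest ih =>
    intro ls c g
    simp only [skewAux, List.map_cons, skewAccum, ih, List.append_assoc, List.cons_append,
      List.nil_append]
    have h : (if ele = 'G' then g + 1 else g) - (if ele = 'C' then c + 1 else c)
        = g - c + skewDelta ele := by
      unfold skewDelta; split_ifs with h1 h2 <;> simp_all <;> omega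
    rw [h]

lemma skewSuffAux_eq (m : List Char) : ∀ (t : Int) (suff : List Int),
    skewSuffAux m t suff = (t + (m.map skewDelta).sum, suff ++ skewAccum t (m.map skewDelta)) := by
  induction m with
  | nil => intro t suff; simp [skewSuffAux, skewAccum]
  | cons ele rest ih =>
    intro t suff
    have h : (if ele = 'G' then t + 1 else if ele = 'C' then t - 1 else t) = t + skewDelta ele := by
      unfold skewDelta; split_ifs <;> omega
    simp only [skewSuffAux, h, ih, List.map_cons, List.sum_cons, skewAccum, List.append_assoc,
      List.cons_append, List.nil_append]
    rw [add_assoc]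

lemma skewAccum_append (xs ys : List Int) : ∀ (a : Int),
    skewAccum a (xs ++ ys) = skewAccum a xs ++ skewAccum (a + xs.sum) ys := by
  induction xs with
  | nil => intro a; simp [skewAccum]
  | cons x xs ih =>
    intro a
    simp only [List.cons_append, skewAccum, ih, List.sum_cons]
    rw [show a + x + xs.sum = a + (x + xs.sum) by ring]

lemma skewAccum_shift (ds : List Int) : ∀ (d a : Int),
    skewAccum (d + a) ds = (skewAccum a ds).map (fun x => d + x) := by
  induction ds with
  | nil => intro d a; simp [skewAccum]
  | cons x ds ih =>
    intro d a
    simp only [skewAccum, List.map_cons, ← ih, add_assoc]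

-- the core: reversing the suffix-skew list and complementing against the total yields prefix skews
lemma rev_complement (ds : List Int) :
    ((0 :: skewAccum 0 ds.reverse).reverse).map (fun x => ds.sum - x)
      = 0 :: skewAccum 0 ds := by
  induction ds with
  | nil => simp [skewAccum]
  | cons d ds ih =>
    simp only [List.sum_cons, List.reverse_cons]
    rw [skewAccum_append, List.sum_reverse]
    simp only [skewAccum, zero_add]
    rw [List.reverse_append, List.reverse_singleton, List.singleton_append, List.cons_append,
      List.map_cons]
    have hf0 : d + ds.sum - (ds.sum + d) = 0 := by ring
    rw [hf0]
    have hx : List.map (fun x => d + ds.sum - x) ((skewAccum 0 ds.reverse).reverse ++ [0])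
        = List.map (fun x => d + x)
            (List.map (fun x => ds.sum - x) ((0 :: skewAccum 0 ds.reverse).reverse)) := by
      rw [List.reverse_cons, List.map_map]
      congr 1; funext x; simp only [Function.comp]; ring
    rw [hx, ih]
    simp only [List.map_cons, ← skewAccum_shift, add_zero]

-- ===== VERDICT =====
theorem skewCount_spec : Claim_equal_skewCount := by
  intro seq _
  show skewCount seq = skewCount_alt seq
  simp only [skewCount, skewCount_alt, skewAux_eq, skewSuffAux_eq, List.map_reverse,
    List.sum_reverse, zero_add, sub_zero, List.singleton_append]
  rw [← List.map_reverse]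
  exact (rev_complement _).symm
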